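-- pv_equiv track=rewrite | github.com/josegibson/Handwriting-Converter | utilities_v2.py | sequence_to_strokes
-- ===== SOURCE A (Python) =====
-- def sequence_to_strokes(sequence):
--     strokes = []
--     stroke = []
--     for x, y, t, p in sequence:
--         if p == 0 and len(stroke) > 0:
--             strokes.append(stroke)
--             stroke = []
--         stroke.append([x, y, t])
--     strokes.append(stroke)
--     return strokes
-- ===== SOURCE B (Python) =====
-- def sequence_to_strokes(sequence):
--     seq = list(sequence)
--     starts = [0] + [i for i, (x, y, t, p) in enumerate(seq) if i > 0 and p == 0]
--     ends = starts[1:] + [len(seq)]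
--     return [[[x, y, t] for x, y, t, p in seq[s:e]] for s, e in zip(starts, ends)]
-- ===== Notes on version B (the rewrite author's own statement) =====
-- stated objective: alternative
-- what changed: Replaces A's running-accumulator pass (current stroke + strokes list mutated while iterating) with an index-table-first decomposition: one pass computes stroke-boundary indices, then the result is built by slicing the sequence between consecutive boundaries.
import Mathlib
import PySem

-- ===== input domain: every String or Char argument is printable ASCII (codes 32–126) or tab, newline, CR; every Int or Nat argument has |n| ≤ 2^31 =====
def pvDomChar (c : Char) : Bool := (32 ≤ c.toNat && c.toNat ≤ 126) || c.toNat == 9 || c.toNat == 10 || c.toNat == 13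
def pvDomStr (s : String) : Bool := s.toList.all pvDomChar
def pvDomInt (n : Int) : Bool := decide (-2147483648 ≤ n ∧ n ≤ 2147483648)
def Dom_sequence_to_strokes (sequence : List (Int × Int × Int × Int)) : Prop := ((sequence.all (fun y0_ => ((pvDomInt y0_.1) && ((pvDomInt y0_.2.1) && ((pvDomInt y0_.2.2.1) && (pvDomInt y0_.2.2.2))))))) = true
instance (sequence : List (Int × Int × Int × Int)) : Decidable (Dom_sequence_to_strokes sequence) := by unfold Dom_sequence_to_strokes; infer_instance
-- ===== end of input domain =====

-- B replaces A's running-accumulator pass with a boundary-index table followed by slicing;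
-- same cost, different decomposition (objective: alternative).

-- ===== PORT A =====
-- literal port of A: fold over the points carrying (strokes, stroke), final append of stroke
def sequence_to_strokes (sequence : List (Int × Int × Int × Int)) : List (List (List Int)) :=
  let st := sequence.foldl
    (fun (acc : List (List (List Int)) × List (List Int)) q =>
      let acc := if q.2.2.2 == 0 && decide (0 < acc.2.length) then (acc.1 ++ [acc.2], ([] : List (List Int))) else acc
      (acc.1, acc.2 ++ [[q.1, q.2.1, q.2.2.1]]))
    ([], [])
  st.1 ++ [st.2]

-- ===== PORT B =====
-- literal port of Source B: boundary indices via enumerate-filter, ends list, then slicing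
def sequence_to_strokes_alt (sequence : List (Int × Int × Int × Int)) : List (List (List Int)) :=
  let seq := sequence
  let starts : List Int :=
    0 :: ((PySem.List.enumerate seq 0).filter
            (fun ip => decide (0 < ip.1) && (ip.2.2.2.2 == 0))).map (·.1)
  let ends : List Int := starts.tail ++ [(seq.length : Int)]
  (starts.zip ends).map
    (fun se => (PySem.List.slice seq (some se.1) (some se.2)).map
                 (fun q => [q.1, q.2.1, q.2.2.1]))

-- ===== PRECONDITION & SPEC =====
def Spec_sequence_to_strokes (sequence : List (Int × Int × Int × Int)) (out : List (List (List Int))) : Prop := out = sequence_to_strokes_alt sequence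
instance (sequence : List (Int × Int × Int × Int)) (out : List (List (List Int))) : Decidable (Spec_sequence_to_strokes sequence out) := by unfold Spec_sequence_to_strokes; infer_instance

-- ===== CLAIM (what is proved, stated in full; the proofs are below) =====
def Claim_equal_sequence_to_strokes : Prop := ∀ (sequence : List (Int × Int × Int × Int)), Dom_sequence_to_strokes sequence → Spec_sequence_to_strokes sequence (sequence_to_strokes sequence)

-- ===== LEMMAS AND PROOFS =====

-- convert one point (the [x, y, t] triple)
def pvConv (q : Int × Int × Int × Int) : List Int := [q.1, q.2.1, q.2.2.1]

-- A's loop step, named for the lemmas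
def pvStepA (acc : List (List (List Int)) × List (List Int)) (q : Int × Int × Int × Int) :
    List (List (List Int)) × List (List Int) :=
  let acc := if q.2.2.2 == 0 && decide (0 < acc.2.length) then (acc.1 ++ [acc.2], ([] : List (List Int))) else acc
  (acc.1, acc.2 ++ [[q.1, q.2.1, q.2.2.1]])

-- structural version of A's loop (cur = current stroke)
def pvAux : List (Int × Int × Int × Int) → List (List Int) → List (List (List Int))
  | [], cur => [cur]
  | q :: r, cur =>
      if q.2.2.2 == 0 && decide (0 < cur.length) then cur :: pvAux r [pvConv q]
      else pvAux r (cur ++ [pvConv q])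

-- stroke-boundary indices, 0-based over the whole list
def pvCuts : List (Int × Int × Int × Int) → List Int
  | [] => []
  | q :: r => if q.2.2.2 == 0 then 0 :: (pvCuts r).map (· + 1) else (pvCuts r).map (· + 1)

-- slicing a list at a table of start indices (ends = shifted starts plus length)
def pvSlices (seq : List (Int × Int × Int × Int)) (starts : List Int) : List (List (List Int)) :=
  (starts.zip (starts.tail ++ [(seq.length : Int)])).map
    (fun se => (PySem.List.slice seq (some se.1) (some se.2)).map pvConv)

theorem pvCuts_nonneg (r : List (Int × Int × Int × Int)) : ∀ c ∈ pvCuts r, 0 ≤ c := by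
  induction r with
  | nil => simp [pvCuts]
  | cons q r ih =>
      intro c hc
      simp only [pvCuts] at hc
      split at hc
      · simp only [List.mem_cons, List.mem_map] at hc
        rcases hc with rfl | ⟨d, hd, rfl⟩
        · omega
        · have := ih d hd; omega
      · simp only [List.mem_map] at hc
        rcases hc with ⟨d, hd, rfl⟩
        have := ih d hd; omega

theorem pv_foldA (r : List (Int × Int × Int × Int)) :
    ∀ (strokes : List (List (List Int))) (stroke : List (List Int)),
    (r.foldl pvStepA (strokes, stroke)).1 ++ [(r.foldl pvStepA (strokes, stroke)).2]
      = strokes ++ pvAux r stroke := by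
  induction r with
  | nil => intro strokes stroke; simp [pvAux]
  | cons q r ih =>
      intro strokes stroke
      simp only [List.foldl_cons]
      by_cases h : (q.2.2.2 == 0 && decide (0 < stroke.length)) = true
      · simp only [pvStepA, h, if_pos, pvAux, pvConv]
        simpa using ih (strokes ++ [stroke]) [[q.1, q.2.1, q.2.2.1]]
      · simp only [pvStepA, pvAux, pvConv]
        rw [if_neg h, if_neg h]
        exact ih strokes (stroke ++ [[q.1, q.2.1, q.2.2.1]])

theorem pv_A_eq_aux (seq : List (Int × Int × Int × Int)) :
    sequence_to_strokes seq = pvAux seq [] := by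
  have : sequence_to_strokes seq
      = (seq.foldl pvStepA ([], [])).1 ++ [(seq.foldl pvStepA ([], [])).2] := rfl
  rw [this]
  simpa using pv_foldA seq [] []

-- slicing with both bounds shifted by one past a cons drops the head exactly
theorem pv_slice_succ (xs : List (Int × Int × Int × Int)) (x : Int × Int × Int × Int)
    (a b : Int) (ha : 0 ≤ a) (hb : 0 ≤ b) :
    PySem.List.slice (x :: xs) (some (a + 1)) (some (b + 1)) = PySem.List.slice xs (some a) (some b) := by
  lift a to ℕ using ha
  lift b to ℕ using hb
  have h1 : (a : Int) + 1 = ((a + 1 : ℕ) : Int) := by push_cast; ring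
  have h2 : (b : Int) + 1 = ((b + 1 : ℕ) : Int) := by push_cast; ring
  rw [h1, h2, PySem.List.slice_natCast, PySem.List.slice_natCast]
  simp [List.drop_succ_cons, Nat.succ_sub_succ]

theorem pv_slice_zero_succ (xs : List (Int × Int × Int × Int)) (x : Int × Int × Int × Int)
    (b : Int) (hb : 0 ≤ b) :
    PySem.List.slice (x :: xs) (some 0) (some (b + 1))
      = x :: PySem.List.slice xs (some 0) (some b) := by
  lift b to ℕ using hb
  have h0 : (0 : Int) = ((0 : ℕ) : Int) := rfl
  have h2 : (b : Int) + 1 = ((b + 1 : ℕ) : Int) := by push_cast; ring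
  rw [h0, h2, PySem.List.slice_natCast, PySem.List.slice_natCast]
  simp

-- shift lemma: slicing q::rs at boundaries shifted by one = slicing rs, with q prepended to the first group
theorem pv_shift (q : Int × Int × Int × Int) (rs : List (Int × Int × Int × Int))
    (cs : List Int) (hcs : ∀ c ∈ cs, 0 ≤ c) :
    pvSlices (q :: rs) (0 :: cs.map (· + 1)) =
      (pvConv q :: (pvSlices rs (0 :: cs)).headI) :: (pvSlices rs (0 :: cs)).tail := by
  have hlen : (((q :: rs).length : ℕ) : Int) = (rs.length : Int) + 1 := by push_cast [List.length_cons]; ring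
  have hL : (0 : Int) ≤ (rs.length : Int) := by positivity
  cases cs with
  | nil =>
      simp only [pvSlices, List.map_nil, List.tail_cons, List.nil_append, List.zip_cons_cons,
        List.zip_nil_right, List.map_cons, List.map_nil, List.headI, List.tail_cons]
      rw [hlen, pv_slice_zero_succ rs q (rs.length : Int) hL]
      rfl
  | cons c cs' =>
      have hc : 0 ≤ c := hcs c (by simp)
      simp only [pvSlices, List.map_cons, List.tail_cons, List.cons_append, List.zip_cons_cons,
        List.map_cons, List.headI, List.tail_cons]
      rw [pv_slice_zero_succ rs q c hc]
      congr 1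
      have e1 : ((c + 1) :: cs'.map (· + 1)) = (c :: cs').map (· + 1) := by simp
      have e2 : (cs'.map (· + 1) ++ [(((q :: rs).length : ℕ) : Int)])
          = (cs' ++ [(rs.length : Int)]).map (· + 1) := by simp
      rw [e1, e2, List.zip_map, List.map_map]
      apply List.map_congr_left
      rintro ⟨a, b⟩ hp
      obtain ⟨ha, hb⟩ := List.of_mem_zip hp
      have ha' : 0 ≤ a := hcs a ha
      have hb' : 0 ≤ b := by
        rcases List.mem_append.1 hb with h | h
        · exact hcs b (List.mem_cons_of_mem c h)
        · simp at h; omega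
      simp only [Function.comp, Prod.map]
      rw [pv_slice_succ rs q a b ha' hb']

-- main invariant: A's structural loop = B's slice table, with the pending stroke prepended
theorem pv_main (r : List (Int × Int × Int × Int)) :
    ∀ (cur : List (List Int)), cur ≠ [] →
    pvAux r cur = (cur ++ (pvSlices r (0 :: pvCuts r)).headI) :: (pvSlices r (0 :: pvCuts r)).tail := by
  induction r with
  | nil =>
      intro cur _
      simp [pvAux, pvCuts, pvSlices, PySem.List.slice]
  | cons q rs ih =>
      intro cur hcur
      have hlen : (0 < cur.length) := List.length_pos_iff.2 hcur
      by_cases hp : (q.2.2.2 == 0) = true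
      · have hsplit : pvSlices (q :: rs) (0 :: pvCuts (q :: rs))
            = [] :: pvSlices (q :: rs) (0 :: (pvCuts rs).map (· + 1)) := by
          simp only [pvCuts, hp, if_pos]
          simp only [pvSlices, List.tail_cons, List.cons_append, List.zip_cons_cons, List.map_cons]
          simp [PySem.List.slice]
        rw [hsplit, pv_shift q rs (pvCuts rs) (pvCuts_nonneg rs)]
        have hcond : (q.2.2.2 == 0 && decide (0 < cur.length)) = true := by
          simp [hp, hlen]
        simp only [pvAux, hcond, if_pos]
        rw [ih [pvConv q] (by simp)]
        simp
      · have hcuts : pvCuts (q :: rs) = (pvCuts rs).map (· + 1) := by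
          simp [pvCuts, hp]
        have hcond : (q.2.2.2 == 0 && decide (0 < cur.length)) = false := by
          simp [hp]
        simp only [pvAux, hcond, Bool.false_eq_true, if_false]
        rw [ih (cur ++ [pvConv q]) (by simp)]
        rw [hcuts, pv_shift q rs (pvCuts rs) (pvCuts_nonneg rs)]
        simp

-- helper: composing two shifts
theorem pv_map_add (l : List Int) (a b : Int) :
    (l.map (· + a)).map (· + b) = l.map (· + (a + b)) := by
  rw [List.map_map]
  apply List.map_congr_left
  intro x _
  simp [Function.comp]
  ring

-- B's filtered enumerate equals the cut table shifted by the enumeration start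
theorem pv_filter_cuts (r : List (Int × Int × Int × Int)) :
    ∀ s : Int, 1 ≤ s →
    ((PySem.List.enumerate r s).filter
        (fun ip => decide (0 < ip.1) && (ip.2.2.2.2 == 0))).map (·.1)
      = (pvCuts r).map (· + s) := by
  induction r with
  | nil => intro s _; simp [PySem.List.enumerate_nil, pvCuts]
  | cons q r ih =>
      intro s hs
      rw [PySem.List.enumerate_cons]
      simp only [List.filter_cons]
      have hpos : decide (0 < s) = true := by simp; omega
      by_cases hp : (q.2.2.2 == 0) = true
      · simp only [hpos, hp, Bool.and_self, List.map_cons, if_pos]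
        rw [ih (s + 1) (by omega)]
        simp only [pvCuts, hp, if_pos, List.map_cons]
        rw [pv_map_add]
        simp [add_comm 1 s]
      · have : (decide (0 < s) && (q.2.2.2 == 0)) = false := by simp [hp]
        simp only [this, Bool.false_eq_true, if_false]
        rw [ih (s + 1) (by omega)]
        simp only [pvCuts, hp, Bool.false_eq_true, if_false]
        rw [pv_map_add]
        simp [add_comm 1 s]

theorem pv_B_eq_slices (seq : List (Int × Int × Int × Int)) :
    sequence_to_strokes_alt seq = pvSlices seq
      (0 :: ((PySem.List.enumerate seq 0).filter
              (fun ip => decide (0 < ip.1) && (ip.2.2.2.2 == 0))).map (·.1)) := rfl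

-- ===== VERDICT (by name: the statement is the Claim_ definition above) =====
theorem sequence_to_strokes_spec : Claim_equal_sequence_to_strokes := by
  intro seq _
  unfold Spec_sequence_to_strokes
  rw [pv_A_eq_aux, pv_B_eq_slices]
  cases seq with
  | nil => simp [pvAux, pvSlices, PySem.List.enumerate_nil, PySem.List.slice]
  | cons q rs =>
      rw [PySem.List.enumerate_cons]
      simp only [List.filter_cons]
      have h0 : (decide ((0 : Int) < 0) && (q.2.2.2 == 0)) = false := by simp
      rw [h0]
      simp only [Bool.false_eq_true, if_false, zero_add]
      rw [pv_filter_cuts rs 1 le_rfl, pv_shift q rs (pvCuts rs) (pvCuts_nonneg rs)]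
      have hc : (q.2.2.2 == 0 && decide (0 < ([] : List (List Int)).length)) = false := by simp
      simp only [pvAux, hc, Bool.false_eq_true, if_false, List.nil_append]
      rw [pv_main rs [pvConv q] (by simp)]
      simp
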